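-- pv_equiv track=rewrite | github.com/FFFold/CAR-M-Literature-search | scripts/pubmed.py | split_records_by_filter
-- ===== SOURCE A (Python) =====
-- from typing import Dict, Iterable, List, Optional, Sequence, Tuple
--
-- def split_records_by_filter(
--     records: Dict[str, Dict[str, str]],
-- ) -> Tuple[Dict[str, Dict[str, str]], Dict[str, Dict[str, str]]]:
--     filtered_records: Dict[str, Dict[str, str]] = {}
--     review_records: Dict[str, Dict[str, str]] = {}
--     for pmid, record in records.items():
--         if record.get("filter_status") == "exclude":
--             continue
--         filtered_records[pmid] = record
--         if record.get("needs_manual_review") == "true":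
--             review_records[pmid] = record
--     return filtered_records, review_records
-- ===== SOURCE B (Python) =====
-- def split_records_by_filter(records):
--     # Divide-and-conquer: recursively split the item list in half, classify the
--     # single-element bases, concatenate the halves' pair lists, and materialise
--     # the two dicts once at the end. Correct because both selections are
--     # pointwise predicates, so they distribute over list concatenation.
--     def go(items):
--         if len(items) <= 1:
--             if not items:
--                 return [], []
--             pmid, rec = items[0]
--             if rec.get("filter_status") == "exclude":
--                 return [], []
--             pair = [(pmid, rec)]
--             if rec.get("needs_manual_review") == "true":
--                 return pair, pair
--             return pair, []
--         mid = len(items) // 2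
--         f1, r1 = go(items[:mid])
--         f2, r2 = go(items[mid:])
--         return f1 + f2, r1 + r2
--     f, r = go(list(records.items()))
--     return dict(f), dict(r)
-- ===== Notes on version B (the rewrite author's own statement) =====
-- stated objective: alternative
-- what changed: Replaces A's single iterative loop mutating two dicts with a divide-and-conquer recursion on the item list (halve, recurse, concatenate the pair lists) whose results are turned into dicts only once at the end; Pre_ only states the dict invariant (distinct outer keys) of the Python argument.
import Mathlib
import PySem

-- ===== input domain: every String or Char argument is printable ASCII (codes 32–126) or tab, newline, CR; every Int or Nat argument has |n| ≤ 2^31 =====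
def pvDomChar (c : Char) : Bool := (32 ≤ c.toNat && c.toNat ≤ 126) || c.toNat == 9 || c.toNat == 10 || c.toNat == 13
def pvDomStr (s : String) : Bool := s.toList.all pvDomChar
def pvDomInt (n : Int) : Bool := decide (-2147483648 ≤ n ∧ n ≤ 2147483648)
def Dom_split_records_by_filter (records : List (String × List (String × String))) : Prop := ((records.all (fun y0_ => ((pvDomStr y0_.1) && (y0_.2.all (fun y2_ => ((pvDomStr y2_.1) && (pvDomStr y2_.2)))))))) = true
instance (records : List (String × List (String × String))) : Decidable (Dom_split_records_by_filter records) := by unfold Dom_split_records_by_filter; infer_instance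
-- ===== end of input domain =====

-- B replaces A's iterative loop mutating two dicts by a recursion over the item list
-- returning a pair of front-prepended pair-lists, converted to dicts once at the end
-- (alternative decomposition, same cost).

-- ===== PORT A =====
-- record.get(k) on the inner dict (assoc list) = first-match lookup
def split_records_by_filter (records : List (String × List (String × String))) : (List (String × List (String × String))) × (List (String × List (String × String))) :=
  let st := records.foldl
    (fun (st : PySem.Dict String (List (String × String)) × PySem.Dict String (List (String × String))) pr =>
      if (PySem.Dict.mk pr.2).get? "filter_status" = some "exclude" then st
      else
        ((st.1.insert pr.1 pr.2),
         (if (PySem.Dict.mk pr.2).get? "needs_manual_review" = some "true" then st.2.insert pr.1 pr.2 else st.2)))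
    (PySem.Dict.empty, PySem.Dict.empty)
  (st.1.items, st.2.items)

-- ===== PORT B =====
-- B's inner recursion 'go': divide and conquer, halving the item list
def pvGo (items : List (String × List (String × String))) :
    (List (String × List (String × String))) × (List (String × List (String × String))) :=
  if _h : items.length ≤ 1 then
    match items with
    | [] => ([], [])
    | (pmid, rec) :: _ =>
      if (PySem.Dict.mk rec).get? "filter_status" = some "exclude" then ([], [])
      else if (PySem.Dict.mk rec).get? "needs_manual_review" = some "true" then
        ([(pmid, rec)], [(pmid, rec)])
      else ([(pmid, rec)], [])
  else
    let fr1 := pvGo (items.take (items.length / 2))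
    let fr2 := pvGo (items.drop (items.length / 2))
    (fr1.1 ++ fr2.1, fr1.2 ++ fr2.2)
termination_by items.length
decreasing_by
  · simp only [List.length_take]; omega
  · simp only [List.length_drop]; omega

-- dict(pairs) = insert each pair in order into an empty dict (later duplicates overwrite)
def pvDictOf (l : List (String × List (String × String))) : PySem.Dict String (List (String × String)) :=
  l.foldl (fun d pr => d.insert pr.1 pr.2) PySem.Dict.empty

def split_records_by_filter_alt (records : List (String × List (String × String))) : (List (String × List (String × String))) × (List (String × List (String × String))) :=
  let fr := pvGo records
  ((pvDictOf fr.1).items, (pvDictOf fr.2).items)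

-- ===== PRECONDITION & SPEC =====
-- Pre_ is the representation invariant of the Python dict argument: its keys are distinct
-- (a Python dict can never present duplicate keys; on duplicate-key assoc lists neither
-- behaviour corresponds to any Python call).
def Pre_split_records_by_filter (records : List (String × List (String × String))) : Prop :=
  (records.map Prod.fst).Nodup
instance (records : List (String × List (String × String))) : Decidable (Pre_split_records_by_filter records) := by unfold Pre_split_records_by_filter; infer_instance

def pvWitness_split_records_by_filter : (List (String × List (String × String))) :=
  [("1", [("filter_status", "include"), ("needs_manual_review", "true")]),
   ("2", [("filter_status", "exclude")]),
   ("3", [])]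

def Spec_split_records_by_filter (records : List (String × List (String × String))) (out : (List (String × List (String × String))) × (List (String × List (String × String)))) : Prop := out = split_records_by_filter_alt records
instance (records : List (String × List (String × String))) (out : (List (String × List (String × String))) × (List (String × List (String × String)))) : Decidable (Spec_split_records_by_filter records out) := by unfold Spec_split_records_by_filter; infer_instance

-- ===== CLAIM =====
def Claim_equal_split_records_by_filter : Prop := ∀ (records : List (String × List (String × String))), Dom_split_records_by_filter records → Pre_split_records_by_filter records → Spec_split_records_by_filter records (split_records_by_filter records)

-- ===== LEMMAS AND PROOFS =====

def pvExcl (pr : String × List (String × String)) : Bool :=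
  decide ((PySem.Dict.mk pr.2).get? "filter_status" = some "exclude")
def pvRev (pr : String × List (String × String)) : Bool :=
  decide ((PySem.Dict.mk pr.2).get? "needs_manual_review" = some "true")

-- B's recursion computes the two filtered sublists (strong induction on the length)
theorem pv_go_eq_aux (n : Nat) : ∀ (l : List (String × List (String × String))), l.length ≤ n →
    pvGo l = (l.filter (fun pr => !pvExcl pr),
              l.filter (fun pr => !pvExcl pr && pvRev pr)) := by
  induction n with
  | zero =>
    intro l hl
    have : l = [] := List.length_eq_zero_iff.mp (Nat.le_zero.mp hl)
    subst this; rw [pvGo]; simp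
  | succ n ih =>
    intro l hl
    rw [pvGo]
    by_cases h1 : l.length ≤ 1
    · simp only [dif_pos h1]
      match l with
      | [] => simp
      | (pmid, rec) :: t =>
        have ht : t = [] := by
          simp only [List.length_cons] at h1
          exact List.length_eq_zero_iff.mp (by omega)
        subst ht
        by_cases hx : (PySem.Dict.mk rec).get? "filter_status" = some "exclude" <;>
          by_cases h2 : (PySem.Dict.mk rec).get? "needs_manual_review" = some "true" <;>
            simp [pvExcl, pvRev, hx, h2]
    · simp only [dif_neg h1]
      rw [ih (l.take (l.length / 2)) (by simp only [List.length_take]; omega),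
          ih (l.drop (l.length / 2)) (by simp only [List.length_drop]; omega)]
      simp [← List.filter_append]

theorem pv_go_eq (l : List (String × List (String × String))) :
    pvGo l = (l.filter (fun pr => !pvExcl pr),
              l.filter (fun pr => !pvExcl pr && pvRev pr)) :=
  pv_go_eq_aux l.length l (Nat.le_refl _)

-- a conditional-insert loop is the unconditional insert loop over the filtered list
theorem pv_foldl_insert_filter (l : List (String × List (String × String)))
    (c : String × List (String × String) → Bool)
    (d : PySem.Dict String (List (String × String))) :
    l.foldl (fun d pr => if c pr then d.insert pr.1 pr.2 else d) d
      = (l.filter c).foldl (fun d pr => d.insert pr.1 pr.2) d := by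
  induction l generalizing d with
  | nil => rfl
  | cons a t ih =>
    by_cases h : c a = true <;> simp [h, ih]

-- insert loop over a fresh-distinct-keys list starting from empty yields that very list
theorem pv_items_insert_loop (l : List (String × List (String × String)))
    (h : (l.map Prod.fst).Nodup) :
    ((l.foldl (fun (d : PySem.Dict String (List (String × String))) pr => d.insert pr.1 pr.2)
        PySem.Dict.empty).items) = l := by
  have := PySem.Dict.items_foldl_insert_fresh (l := l) (k := Prod.fst) (v := Prod.snd)
      (d := PySem.Dict.empty) (by intro a _; simp) h
  simpa using this

-- the first component of A's pair fold
theorem pv_fold_fst (l : List (String × List (String × String)))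
    (st : PySem.Dict String (List (String × String)) × PySem.Dict String (List (String × String))) :
    (l.foldl
      (fun (st : PySem.Dict String (List (String × String)) × PySem.Dict String (List (String × String))) pr =>
        if (PySem.Dict.mk pr.2).get? "filter_status" = some "exclude" then st
        else ((st.1.insert pr.1 pr.2),
          (if (PySem.Dict.mk pr.2).get? "needs_manual_review" = some "true" then st.2.insert pr.1 pr.2 else st.2)))
      st).1
    = l.foldl (fun d pr => if !pvExcl pr then d.insert pr.1 pr.2 else d) st.1 := by
  induction l generalizing st with
  | nil => rfl
  | cons a t ih =>
    by_cases h : (PySem.Dict.mk a.2).get? "filter_status" = some "exclude" <;>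
      simp [pvExcl, h, ih]

-- the second component of A's pair fold
theorem pv_fold_snd (l : List (String × List (String × String)))
    (st : PySem.Dict String (List (String × String)) × PySem.Dict String (List (String × String))) :
    (l.foldl
      (fun (st : PySem.Dict String (List (String × String)) × PySem.Dict String (List (String × String))) pr =>
        if (PySem.Dict.mk pr.2).get? "filter_status" = some "exclude" then st
        else ((st.1.insert pr.1 pr.2),
          (if (PySem.Dict.mk pr.2).get? "needs_manual_review" = some "true" then st.2.insert pr.1 pr.2 else st.2)))
      st).2
    = l.foldl (fun d pr => if !pvExcl pr && pvRev pr then d.insert pr.1 pr.2 else d) st.2 := by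
  induction l generalizing st with
  | nil => rfl
  | cons a t ih =>
    by_cases h : (PySem.Dict.mk a.2).get? "filter_status" = some "exclude" <;>
      by_cases h2 : (PySem.Dict.mk a.2).get? "needs_manual_review" = some "true" <;>
        simp [pvExcl, pvRev, h, h2, ih]

theorem pv_nodup_filter (l : List (String × List (String × String)))
    (c : String × List (String × String) → Bool)
    (h : (l.map Prod.fst).Nodup) : ((l.filter c).map Prod.fst).Nodup :=
  h.sublist ((List.filter_sublist (l := l)).map Prod.fst)

-- ===== VERDICT =====
theorem split_records_by_filter_spec : Claim_equal_split_records_by_filter := by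
  intro records _ hpre
  unfold Spec_split_records_by_filter split_records_by_filter split_records_by_filter_alt pvDictOf
  have hF : (records.filter (fun pr => !pvExcl pr)).map Prod.fst |>.Nodup :=
    pv_nodup_filter records _ hpre
  have hFR : ((records.filter (fun pr => !pvExcl pr && pvRev pr)).map Prod.fst).Nodup :=
    pv_nodup_filter records _ hpre
  -- A's two components are the two filtered sublists
  have e1 := pv_fold_fst records (PySem.Dict.empty, PySem.Dict.empty)
  have e2 := pv_fold_snd records (PySem.Dict.empty, PySem.Dict.empty)
  simp only []
  rw [e1, e2, pv_foldl_insert_filter, pv_foldl_insert_filter,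
      pv_items_insert_loop _ hF, pv_items_insert_loop _ hFR,
      pv_go_eq, pv_items_insert_loop _ hF, pv_items_insert_loop _ hFR]
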